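-- pv_equiv track=rewrite | github.com/THU-KEG/CStory | CStory/utils/algorithms/DenDBSCAN.py | convert_label_to_cluster
-- ===== SOURCE A (Python) =====
-- from collections import defaultdict
--
-- def convert_label_to_cluster(labels, origin_count):
--     cluster = defaultdict(list)
--     for index, label in enumerate(labels):
--         cluster[label].append(index)
--     solo_point = []
--     for key in cluster:
--         if len(cluster[key]) == 1 and key != origin_count:
--             solo_point.append(cluster[key][0])
--     return solo_point
-- ===== SOURCE B (Python) =====
-- def convert_label_to_cluster(labels, origin_count):
--     # an index is returned iff its label appears nowhere else in the list
--     # (checked directly by slice membership) and differs from origin_count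
--     return [i for i, lab in enumerate(labels)
--             if lab != origin_count
--             and lab not in labels[:i]
--             and lab not in labels[i + 1:]]
-- ===== Notes on version B (the rewrite author's own statement) =====
-- stated objective: alternative
-- what changed: Drops A's dict-of-index-lists grouping entirely: B decides solo-ness per index directly by slice membership tests (lab not in labels[:i] and not in labels[i+1:]) in one comprehension over enumerate(labels), with no auxiliary table; output order is preserved because singleton indices coincide with first-appearance order of their labels.
import Mathlib
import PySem

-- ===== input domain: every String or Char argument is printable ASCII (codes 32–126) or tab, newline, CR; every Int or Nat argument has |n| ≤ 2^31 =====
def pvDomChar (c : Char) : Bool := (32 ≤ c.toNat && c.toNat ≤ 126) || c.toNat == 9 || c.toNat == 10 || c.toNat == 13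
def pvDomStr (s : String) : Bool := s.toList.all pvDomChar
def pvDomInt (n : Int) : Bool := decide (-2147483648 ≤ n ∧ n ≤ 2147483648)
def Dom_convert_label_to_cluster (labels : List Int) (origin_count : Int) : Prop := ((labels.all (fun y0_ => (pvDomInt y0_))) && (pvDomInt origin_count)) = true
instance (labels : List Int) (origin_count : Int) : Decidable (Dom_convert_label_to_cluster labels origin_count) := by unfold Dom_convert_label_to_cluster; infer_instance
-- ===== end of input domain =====

-- B drops A's dict-of-index-lists grouping entirely and decides solo-ness per index by
-- slice membership tests in one comprehension; a different algorithm of the same result.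

-- ===== PORT A =====
-- cluster = defaultdict(list); for index, label in enumerate(labels): cluster[label].append(index)
def pvCluster (labels : List Int) : PySem.Dict Int (List Int) :=
  (PySem.List.enumerate labels 0).foldl
    (fun d p => d.modify p.2 [] (fun g => g ++ [p.1])) PySem.Dict.empty

-- for key in cluster: if len(cluster[key]) == 1 and key != origin_count: solo_point.append(cluster[key][0])
def convert_label_to_cluster (labels : List Int) (origin_count : Int) : List Int :=
  (pvCluster labels).keys.foldl
    (fun solo_point k =>
      if (PySem.List.len ((pvCluster labels).getD k []) == 1) && !(k == origin_count)
      -- cluster[key][0]: index 0 is in range because the guard gives the list length 1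
      then solo_point ++ [PySem.List.pyGetD ((pvCluster labels).getD k []) 0 0]
      else solo_point) []

-- ===== PORT B =====
-- [i for i, lab in enumerate(labels)
--    if lab != origin_count and lab not in labels[:i] and lab not in labels[i+1:]]
def convert_label_to_cluster_alt (labels : List Int) (origin_count : Int) : List Int :=
  ((PySem.List.enumerate labels 0).filter
      (fun q => !(q.2 == origin_count)
        && !((PySem.List.slice labels none (some q.1)).contains q.2)
        && !((PySem.List.slice labels (some (q.1 + 1)) none).contains q.2))).map
    (fun q => q.1)

-- ===== PRECONDITION & SPEC =====
def Spec_convert_label_to_cluster (labels : List Int) (origin_count : Int) (out : List Int) : Prop := out = convert_label_to_cluster_alt labels origin_count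
instance (labels : List Int) (origin_count : Int) (out : List Int) : Decidable (Spec_convert_label_to_cluster labels origin_count out) := by unfold Spec_convert_label_to_cluster; infer_instance

-- ===== CLAIM (what is proved, stated in full; the proofs are below) =====
def Claim_equal_convert_label_to_cluster : Prop := ∀ (labels : List Int) (origin_count : Int), Dom_convert_label_to_cluster labels origin_count → Spec_convert_label_to_cluster labels origin_count (convert_label_to_cluster labels origin_count)

-- ===== LEMMAS AND PROOFS =====

-- the number of occurrences of label k among the enumerated pairs is its count in labels
lemma countP_enumerate_snd (labels : List Int) (k : Int) :
    (PySem.List.enumerate labels 0).countP (fun r => r.2 == k) = labels.count k := by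
  simp only [List.count]
  conv_rhs => rw [← PySem.List.map_snd_enumerate labels 0]
  rw [List.countP_map]
  rfl

-- a label occurring exactly once is enumerated exactly at its own pair
lemma filter_enumerate_singleton (labels : List Int) (q : Int × Int)
    (hq : q ∈ PySem.List.enumerate labels 0) (h1 : labels.count q.2 = 1) :
    (PySem.List.enumerate labels 0).filter (fun r => r.2 == q.2) = [q] := by
  have hlen : ((PySem.List.enumerate labels 0).filter (fun r => r.2 == q.2)).length = 1 := by
    rw [← List.countP_eq_length_filter, countP_enumerate_snd, h1]
  obtain ⟨a, ha⟩ := List.length_eq_one_iff.mp hlen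
  have hqm : q ∈ (PySem.List.enumerate labels 0).filter (fun r => r.2 == q.2) := by
    simp [List.mem_filter, hq]
  rw [ha] at hqm ⊢
  simp_all

-- filtering with a predicate false on every duplicated element does not see the dedup
lemma filter_ofList_eq_filter {α : Type} [BEq α] [LawfulBEq α] (l : List α) (p : α → Bool) :
    (∀ k, 2 ≤ l.count k → p k = false) →
    (PySem.Set.ofList l).filter p = l.filter p := by
  induction l using List.reverseRecOn with
  | nil => intro _; rfl
  | append_singleton xs x ih =>
    intro h
    rw [PySem.Set.ofList_append_singleton, PySem.Set.add_eq_ite]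
    have hcount : ∀ k, 2 ≤ xs.count k → p k = false := fun k hk =>
      h k (by rw [List.count_append]; omega)
    by_cases hx : x ∈ PySem.Set.ofList xs
    · have hx' : x ∈ xs := (PySem.Set.mem_ofList _ _).mp hx
      have hpx : p x = false := h x (by
        rw [List.count_append]
        have := List.count_pos_iff.mpr hx'
        simp
        omega)
      rw [if_pos hx, List.filter_append, ih hcount]
      simp [hpx]
    · rw [if_neg hx, List.filter_append, List.filter_append, ih hcount]

-- the dict's buckets: the indices of each label, in order
lemma getD_pvCluster (labels : List Int) (k : Int) :
    (pvCluster labels).getD k []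
      = ((PySem.List.enumerate labels 0).filter (fun r => r.2 == k)).map (fun r => r.1) := by
  have hswap : pvCluster labels =
      ((PySem.List.enumerate labels 0).map Prod.swap).foldl
        (fun d p => d.modify p.1 [] (fun g => g ++ [p.2])) PySem.Dict.empty := by
    rw [List.foldl_map]; rfl
  rw [hswap, PySem.Dict.getD_foldl_modify_append, List.filter_map, List.map_map]
  rfl

-- the dict's keys: the distinct labels, in first-appearance order
lemma keys_pvCluster (labels : List Int) :
    (pvCluster labels).keys = PySem.Set.ofList labels := by
  rw [pvCluster, PySem.Dict.keys_foldl_modify_key]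
  simp only [PySem.Dict.keys_empty, PySem.Set.update_nil_left]
  exact congrArg _ (PySem.List.map_snd_enumerate labels 0)

-- B's slice-membership test on an enumerated pair is exactly the count-one test
lemma predB_eq_count (labels : List Int) (origin_count : Int) (q : Int × Int)
    (hq : q ∈ PySem.List.enumerate labels 0) :
    (!(q.2 == origin_count)
        && !((PySem.List.slice labels none (some q.1)).contains q.2)
        && !((PySem.List.slice labels (some (q.1 + 1)) none).contains q.2))
      = (decide (labels.count q.2 = 1) && !(q.2 == origin_count)) := by
  obtain ⟨k, hk, hqe⟩ := (PySem.List.mem_enumerate_iff _ _ _).mp hq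
  subst hqe
  simp only [zero_add]
  have h1 : PySem.List.slice labels none (some (k : Int)) = labels.take k :=
    PySem.List.slice_to_natCast labels k
  have h2 : PySem.List.slice labels (some ((k : Int) + 1)) none = labels.drop (k + 1) := by
    have : ((k : Int) + 1) = ((k + 1 : Nat) : Int) := by push_cast; ring
    rw [this, PySem.List.slice_from_natCast]
  rw [h1, h2]
  have hdecomp : labels = labels.take k ++ labels[k] :: labels.drop (k + 1) := by
    conv_lhs => rw [← List.take_append_drop k labels]
    rw [List.drop_eq_getElem_cons hk]
  have hcount : labels.count labels[k]
      = (labels.take k).count labels[k] + (labels.drop (k + 1)).count labels[k] + 1 := by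
    have hc := congrArg (List.count labels[k]) hdecomp
    rw [List.count_append, List.count_cons_self] at hc
    omega
  by_cases ht : labels[k] ∈ labels.take k
  · have : 1 ≤ (labels.take k).count labels[k] := List.count_pos_iff.mpr ht
    have : labels.count labels[k] ≠ 1 := by omega
    simp [ht, this]
  · by_cases hd : labels[k] ∈ labels.drop (k + 1)
    · have : 1 ≤ (labels.drop (k + 1)).count labels[k] := List.count_pos_iff.mpr hd
      have : labels.count labels[k] ≠ 1 := by omega
      simp [ht, hd, this]
    · have hct : (labels.take k).count labels[k] = 0 := List.count_eq_zero.mpr ht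
      have hcd : (labels.drop (k + 1)).count labels[k] = 0 := List.count_eq_zero.mpr hd
      have : labels.count labels[k] = 1 := by omega
      simp [ht, hd, this]

-- ===== VERDICT (by name: the statement is the Claim_ definition above) =====
theorem convert_label_to_cluster_spec : Claim_equal_convert_label_to_cluster := by
  intro labels origin_count _dom
  unfold Spec_convert_label_to_cluster convert_label_to_cluster convert_label_to_cluster_alt
  rw [PySem.List.foldl_append_if
        (p := fun k => (PySem.List.len ((pvCluster labels).getD k []) == 1) && !(k == origin_count))
        (f := fun k => PySem.List.pyGetD ((pvCluster labels).getD k []) 0 0),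
      keys_pvCluster, List.nil_append]
  -- A's guard is a pure count test on the label
  have hp : (fun k => (PySem.List.len ((pvCluster labels).getD k []) == 1) && !(k == origin_count))
      = (fun k => decide (labels.count k = 1) && !(k == origin_count)) := by
    funext k
    rw [getD_pvCluster]
    have hlen : (((PySem.List.enumerate labels 0).filter (fun r => r.2 == k)).map (fun r => r.1)).length
        = labels.count k := by
      rw [List.length_map, ← List.countP_eq_length_filter, countP_enumerate_snd]
    by_cases h1 : labels.count k = 1
    · simp [PySem.List.len_eq, hlen, h1]
    · simp only [PySem.List.len_eq, hlen]
      have : ¬ ((labels.count k : Int) = 1) := by exact_mod_cast h1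
      simp [h1, this]
  rw [hp, filter_ofList_eq_filter labels _ (fun k hk => by
    have : labels.count k ≠ 1 := by omega
    simp [this])]
  -- move the filter from labels to the enumerated pairs
  have hlab : ∀ p : Int → Bool, labels.filter p
      = ((PySem.List.enumerate labels 0).filter (fun q => p q.2)).map (fun q => q.2) := by
    intro p
    conv_lhs => rw [← PySem.List.map_snd_enumerate labels 0]
    rw [List.filter_map]
    rfl
  rw [hlab, List.map_map]
  -- on singleton labels the bucket's single index is the pair's own index
  have hmap : ((PySem.List.enumerate labels 0).filter
        (fun q => decide (labels.count q.2 = 1) && !(q.2 == origin_count))).map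
        ((fun k => PySem.List.pyGetD ((pvCluster labels).getD k []) 0 0) ∘ (fun q => q.2))
      = ((PySem.List.enumerate labels 0).filter
        (fun q => decide (labels.count q.2 = 1) && !(q.2 == origin_count))).map (fun q => q.1) := by
    apply List.map_congr_left
    intro q hq
    obtain ⟨hqE, hcond⟩ := List.mem_filter.mp hq
    have h1 : labels.count q.2 = 1 := by
      simp only [Bool.and_eq_true, decide_eq_true_eq] at hcond
      exact hcond.1
    show PySem.List.pyGetD ((pvCluster labels).getD q.2 []) 0 0 = q.1
    rw [getD_pvCluster, filter_enumerate_singleton labels q hqE h1]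
    rfl
  rw [hmap]
  -- B's slice-membership guard agrees with the count test on every enumerated pair
  apply congrArg
  apply List.filter_congr
  intro q hq
  exact (predB_eq_count labels origin_count q hq).symm
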